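-- pv_equiv track=rewrite | github.com/dowens804/song-theme-guess | test-keras/data-helper.py | getCountOfWordsInDictionary
-- ===== SOURCE A (Python) =====
-- def getCountOfWordsInDictionary(lyrics, aw_list):
--     lyric_word_list = lyrics.split()
--     count_dict = {}
--
--     for word in lyric_word_list:
--         if word in aw_list:
--             if word in count_dict.keys():
--                 count_dict[word] = count_dict[word] + 1
--             else:
--                 count_dict[word] = 1
--     return count_dict
-- ===== SOURCE B (Python) =====
-- def getCountOfWordsInDictionary(lyrics, aw_list):
--     words = lyrics.split()
--     seen = []
--     for w in words:
--         if w in aw_list and w not in seen: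
--             seen.append(w)
--     return {w: words.count(w) for w in seen}
-- ===== Notes on version B (the rewrite author's own statement) =====
-- stated objective: alternative
-- what changed: A increments a counter dict while scanning; B never maintains running counts: it first collects the distinct allowed words in first-occurrence order, then computes each final count with words.count(w) in a comprehension.
import Mathlib
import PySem

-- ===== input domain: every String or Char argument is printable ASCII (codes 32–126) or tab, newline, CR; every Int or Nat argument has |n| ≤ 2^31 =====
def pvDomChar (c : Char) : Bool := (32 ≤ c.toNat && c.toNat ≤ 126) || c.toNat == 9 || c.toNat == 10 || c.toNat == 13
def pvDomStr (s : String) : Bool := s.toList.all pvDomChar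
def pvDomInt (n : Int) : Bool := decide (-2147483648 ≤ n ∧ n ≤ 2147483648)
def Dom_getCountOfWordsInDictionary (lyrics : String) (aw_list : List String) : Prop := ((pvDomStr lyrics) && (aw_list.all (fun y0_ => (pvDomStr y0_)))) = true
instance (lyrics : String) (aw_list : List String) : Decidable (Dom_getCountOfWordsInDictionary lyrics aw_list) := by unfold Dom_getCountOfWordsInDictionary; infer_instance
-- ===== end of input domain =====

-- B replaces A's running counter dict with dedup-then-count: collect distinct allowed words in first-occurrence order, then look each count up with list.count (alternative decomposition, same cost class).


-- ===== PORT A =====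
def getCountOfWordsInDictionary (lyrics : String) (aw_list : List String) : List (String × Int) :=
  let lyric_word_list := PySem.Str.split₀ lyrics
  let count_dict :=
    lyric_word_list.foldl
      (fun d word =>
        if word ∈ aw_list then
          if d.contains word then d.insert word (d.getD word 0 + 1)
          else d.insert word 1
        else d)
      (PySem.Dict.empty : PySem.Dict String Int)
  count_dict.items

-- ===== PORT B =====
-- seen: 'if w in aw_list and w not in seen: seen.append(w)' is PySem.Set.add under the allowed guard;
-- the final dict comprehension over the duplicate-free 'seen' is a map to an association list.
def getCountOfWordsInDictionary_alt (lyrics : String) (aw_list : List String) : List (String × Int) :=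
  let words := PySem.Str.split₀ lyrics
  let seen :=
    words.foldl (fun s w => if w ∈ aw_list then PySem.Set.add s w else s)
      (PySem.Set.empty : PySem.Set String)
  seen.map (fun w => (w, (words.count w : Int)))

-- ===== PRECONDITION & SPEC =====
def Spec_getCountOfWordsInDictionary (lyrics : String) (aw_list : List String) (out : List (String × Int)) : Prop := out = getCountOfWordsInDictionary_alt lyrics aw_list
instance (lyrics : String) (aw_list : List String) (out : List (String × Int)) : Decidable (Spec_getCountOfWordsInDictionary lyrics aw_list out) := by unfold Spec_getCountOfWordsInDictionary; infer_instance

-- ===== CLAIM (what is proved, stated in full; the proofs are below) =====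
def Claim_equal_getCountOfWordsInDictionary : Prop := ∀ (lyrics : String) (aw_list : List String), Dom_getCountOfWordsInDictionary lyrics aw_list → Spec_getCountOfWordsInDictionary lyrics aw_list (getCountOfWordsInDictionary lyrics aw_list)

-- ===== LEMMAS AND PROOFS =====

-- A's "if word in dict: +1 else: 1" body is insert word (getD word 0 + 1).
theorem insertCount_eq (d : PySem.Dict String Int) (w : String) :
    (if d.contains w then d.insert w (d.getD w 0 + 1) else d.insert w 1) =
      d.insert w (d.getD w 0 + 1) := by
  by_cases h : d.contains w = true
  · simp [h]
  · have h' : d.contains w = false := by simpa using h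
    rw [PySem.Dict.getD_of_not_contains d 0 h']
    simp [h']

-- Closed form of A: the counter of the allowed words, in first-occurrence order.
theorem sideA (lyrics : String) (aw_list : List String) :
    getCountOfWordsInDictionary lyrics aw_list =
      (PySem.Set.ofList ((PySem.Str.split₀ lyrics).filter (fun w => decide (w ∈ aw_list)))).map
        (fun k => (k, (((PySem.Str.split₀ lyrics).filter (fun w => decide (w ∈ aw_list))).count k : Int))) := by
  show ((PySem.Str.split₀ lyrics).foldl
      (fun d word =>
        if word ∈ aw_list then
          if d.contains word then d.insert word (d.getD word 0 + 1)
          else d.insert word 1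
        else d)
      (PySem.Dict.empty : PySem.Dict String Int)).items = _
  have hbody : (fun (d : PySem.Dict String Int) (word : String) =>
      if word ∈ aw_list then
        if d.contains word then d.insert word (d.getD word 0 + 1)
        else d.insert word 1
      else d) =
      (fun d word => if word ∈ aw_list then d.insert word (d.getD word 0 + 1) else d) := by
    funext d word
    by_cases h : word ∈ aw_list
    · simp [h, insertCount_eq]
    · simp [h]
  rw [hbody,
    PySem.List.foldl_ite_eq_foldl_filter (fun w : String => w ∈ aw_list)
      (fun (d : PySem.Dict String Int) word => d.insert word (d.getD word 0 + 1)),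
    PySem.Dict.foldl_insert_getD_add_one_eq_counter, PySem.Dict.items_counter]

-- Closed form of B's 'seen': set(filtered words) in first-occurrence order.
theorem seen_eq (words : List String) (aw_list : List String) :
    words.foldl (fun s w => if w ∈ aw_list then PySem.Set.add s w else s)
        (PySem.Set.empty : PySem.Set String) =
      PySem.Set.ofList (words.filter (fun w => decide (w ∈ aw_list))) := by
  rw [PySem.List.foldl_ite_eq_foldl_filter (fun w : String => w ∈ aw_list) PySem.Set.add,
    PySem.Set.ofList_eq_foldl]
  rfl

-- A and B agree: counts over the full word list equal counts over the allowed-filtered list on allowed words.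
theorem getCountOfWordsInDictionary_eq (lyrics : String) (aw_list : List String) :
    getCountOfWordsInDictionary lyrics aw_list = getCountOfWordsInDictionary_alt lyrics aw_list := by
  rw [sideA]
  show _ = ((PySem.Str.split₀ lyrics).foldl
      (fun s w => if w ∈ aw_list then PySem.Set.add s w else s)
      (PySem.Set.empty : PySem.Set String)).map
      (fun w => (w, ((PySem.Str.split₀ lyrics).count w : Int)))
  rw [seen_eq]
  apply List.map_congr_left
  intro k hk
  have hmem : (decide (k ∈ aw_list)) = true := by
    have := PySem.Set.mem_ofList (xs := (PySem.Str.split₀ lyrics).filter (fun w => decide (w ∈ aw_list))) (y := k)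
    rw [this] at hk
    exact (List.mem_filter.mp hk).2
  have := List.count_filter (l := PySem.Str.split₀ lyrics) (p := fun w => decide (w ∈ aw_list)) hmem
  simp [this]

-- ===== VERDICT (by name: the statement is the Claim_ definition above) =====
theorem getCountOfWordsInDictionary_spec : Claim_equal_getCountOfWordsInDictionary := by
  intro lyrics aw_list _
  exact getCountOfWordsInDictionary_eq lyrics aw_list
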